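-- pv_equiv track=rewrite | github.com/NicoleAtos/git_automation | D1LH-PLAT-ACCESS-Infrastructure/notebooks/global_lib/global_utils/global_functions.py | _get_most_relevant_ccn
-- ===== SOURCE A (Python) =====
-- def _get_most_relevant_ccn(raw_part_name: str, ccn_table, view_name: str=None, source_table: str=None, source_system: str=None):
--   """
--   Function: _get_most_relevant_ccn
--   Description: Identifies the most relevant common column names (CCN) for a given raw column name by searching through a specified CCN table using various matching criteria.
--   Parameters:
--      - raw_part_name (str): The original name of the column or a part of it (prefix or suffix) to find the most relevant CCN.
--      - ccn_table: The table containing entries of common column names (CCNs) and their mappings.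
--      - view_name (str): Optional. The name of the view to which the CCN should be applied.
--      - source_table (str): Optional. The name of the source table from which the view is created.
--      - source_system (str): Optional. The identifier for the source system of the data.
--   Returns: list - A list of the most relevant CCNs found based on the matching criteria or an empty list if no matches are found.
--   Author: Dmytro Ilienko
--   Date: 2023-01-01
--   """
--   # Find ccn's of the column
--   ccn_table_relevant_raw_col = [item for item in ccn_table if item["RAW_COLUMN_NAME"].lower()==raw_part_name.lower()]
--   if len(ccn_table_relevant_raw_col) == 0:
--     # raw_part_name does not have a ccn, we can skip
--     return ccn_table_relevant_raw_col
--
--   # try match views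
--   if view_name is not None:
--     view_ccns = [item for item in ccn_table_relevant_raw_col if item["VIEW_NAME"] == view_name]
--     if len(view_ccns) > 0:
--       return view_ccns
--
--   # try match raw_table_name and source_system combination
--   if source_system is not None and source_table is not None:
--     source_system_raw_table_ccns = [item for item in ccn_table_relevant_raw_col if item["RAW_TABLE_NAME"] == source_table and item["SOURCE_SYSTEM"] == source_system]
--     if len(source_system_raw_table_ccns) > 0:
--       return source_system_raw_table_ccns
--
--   # try match raw_table_name
--   if source_table is not None:
--     raw_table_ccns = [item for item in ccn_table_relevant_raw_col if item["RAW_TABLE_NAME"] == source_table]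
--     if len(raw_table_ccns) > 0:
--       return raw_table_ccns
--
--   # try match source_system
--   if source_system is not None:
--     source_system_ccns = [item for item in ccn_table_relevant_raw_col if item["SOURCE_SYSTEM"] == source_system]
--     if len(source_system_ccns) > 0:
--       return source_system_ccns
--
--   # return just general rules
--   general_ccns = [item for item in ccn_table_relevant_raw_col if item["VIEW_NAME"] == "" and item["RAW_TABLE_NAME"] == "" and item["SOURCE_SYSTEM"] == ""]
--   return general_ccns
-- ===== SOURCE B (Python) =====
-- def _get_most_relevant_ccn(raw_part_name, ccn_table, view_name=None, source_table=None, source_system=None):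
--     # One pass over ccn_table: classify each relevant row into priority buckets,
--     # then return the first non-empty bucket in priority order (general last).
--     key = raw_part_name.lower()
--     view_b, combo_b, table_b, system_b, general_b = [], [], [], [], []
--     for item in ccn_table:
--         if item["RAW_COLUMN_NAME"].lower() != key:
--             continue
--         v = item["VIEW_NAME"]
--         t = item["RAW_TABLE_NAME"]
--         s = item["SOURCE_SYSTEM"]
--         vm = view_name is not None and v == view_name
--         tm = source_table is not None and t == source_table
--         sm = source_system is not None and s == source_system
--         if vm:
--             view_b.append(item)
--         if tm and sm:
--             combo_b.append(item)
--         if tm: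
--             table_b.append(item)
--         if sm:
--             system_b.append(item)
--         if v == "" and t == "" and s == "":
--             general_b.append(item)
--     return view_b or combo_b or table_b or system_b or general_b
-- ===== Notes on version B (the rewrite author's own statement) =====
-- stated objective: alternative
-- what changed: A runs up to six separate filter passes over the rows (relevance plus one per criterion) with early returns; B makes a single pass classifying each relevant row into five priority buckets and then returns the first non-empty bucket in priority order.
import Mathlib
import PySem

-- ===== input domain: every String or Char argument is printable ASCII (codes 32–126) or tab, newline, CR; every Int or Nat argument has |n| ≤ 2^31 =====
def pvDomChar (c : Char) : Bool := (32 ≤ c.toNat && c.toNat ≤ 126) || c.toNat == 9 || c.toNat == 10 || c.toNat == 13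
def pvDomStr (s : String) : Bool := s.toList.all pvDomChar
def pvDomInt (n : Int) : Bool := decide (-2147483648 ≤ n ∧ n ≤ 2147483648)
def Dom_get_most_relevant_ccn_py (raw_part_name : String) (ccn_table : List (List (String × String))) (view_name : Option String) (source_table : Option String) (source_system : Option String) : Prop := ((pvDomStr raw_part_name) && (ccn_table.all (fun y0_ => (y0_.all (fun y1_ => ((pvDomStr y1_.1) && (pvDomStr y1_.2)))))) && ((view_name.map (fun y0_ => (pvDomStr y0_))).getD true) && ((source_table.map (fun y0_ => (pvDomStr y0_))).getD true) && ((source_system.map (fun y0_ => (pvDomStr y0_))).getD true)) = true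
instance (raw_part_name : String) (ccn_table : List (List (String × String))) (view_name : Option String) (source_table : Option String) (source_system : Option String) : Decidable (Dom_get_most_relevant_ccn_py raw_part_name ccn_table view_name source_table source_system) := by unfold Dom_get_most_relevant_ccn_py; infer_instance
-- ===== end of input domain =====

-- B replaces A's chain of up to six filter passes with one classifying pass into
-- five priority buckets; same return value on every input where A returns (alternative decomposition).

-- ===== PORT A =====
-- shared dict primitive: item[k] on an association list (first match); under Pre_ the key is present,
-- so the "" default is never the returned value of a lookup the Python performs
def pvGet (it : List (String × String)) (k : String) : String :=
  (((it.find? (fun p => p.1 == k)).map Prod.snd).getD "")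

def pvHasKey (it : List (String × String)) (k : String) : Bool :=
  (it.find? (fun p => p.1 == k)).isSome

def pvRel (raw_part_name : String) (it : List (String × String)) : Bool :=
  PySem.Str.lower (pvGet it "RAW_COLUMN_NAME") == PySem.Str.lower raw_part_name

-- the tail of A after the source_table stage ("try match source_system" + general fallthrough)
def pvA_afterTable (rel : List (List (String × String))) (source_system : Option String) : List (List (String × String)) :=
  let general := rel.filter (fun it => pvGet it "VIEW_NAME" == "" && pvGet it "RAW_TABLE_NAME" == "" && pvGet it "SOURCE_SYSTEM" == "")
  match source_system with
  | some s =>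
      let c := rel.filter (fun it => pvGet it "SOURCE_SYSTEM" == s)
      if c.length > 0 then c else general
  | none => general

-- the tail of A after the combination stage ("try match raw_table_name" onwards)
def pvA_afterCombo (rel : List (List (String × String))) (source_table source_system : Option String) : List (List (String × String)) :=
  match source_table with
  | some t =>
      let c := rel.filter (fun it => pvGet it "RAW_TABLE_NAME" == t)
      if c.length > 0 then c else pvA_afterTable rel source_system
  | none => pvA_afterTable rel source_system

-- the tail of A after the view stage ("try match raw_table_name and source_system combination" onwards)
def pvA_afterView (rel : List (List (String × String))) (source_table source_system : Option String) : List (List (String × String)) :=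
  match source_system, source_table with
  | some s, some t =>
      let c := rel.filter (fun it => pvGet it "RAW_TABLE_NAME" == t && pvGet it "SOURCE_SYSTEM" == s)
      if c.length > 0 then c else pvA_afterCombo rel source_table source_system
  | _, _ => pvA_afterCombo rel source_table source_system

def get_most_relevant_ccn_py (raw_part_name : String) (ccn_table : List (List (String × String))) (view_name : Option String) (source_table : Option String) (source_system : Option String) : List (List (String × String)) :=
  let rel := ccn_table.filter (pvRel raw_part_name)
  if rel.length = 0 then rel
  else
    match view_name with
    | some v =>
        let vc := rel.filter (fun it => pvGet it "VIEW_NAME" == v)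
        if vc.length > 0 then vc else pvA_afterView rel source_table source_system
    | none => pvA_afterView rel source_table source_system

-- ===== PORT B =====
-- Python's `x or y` on lists: first operand if non-empty, else second
def pvOr (x y : List (List (String × String))) : List (List (String × String)) :=
  if x = [] then y else x

abbrev pvB5 := List (List (String × String)) × List (List (String × String)) × List (List (String × String)) × List (List (String × String)) × List (List (String × String))

-- loop body of B: classify one row into the five buckets
def pvB_step (view_name source_table source_system : Option String) (key : String) (b : pvB5) (it : List (String × String)) : pvB5 :=
  if PySem.Str.lower (pvGet it "RAW_COLUMN_NAME") != key then b
  else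
    let v := pvGet it "VIEW_NAME"
    let t := pvGet it "RAW_TABLE_NAME"
    let s := pvGet it "SOURCE_SYSTEM"
    let vm := match view_name with | some x => v == x | none => false
    let tm := match source_table with | some x => t == x | none => false
    let sm := match source_system with | some x => s == x | none => false
    ((if vm then b.1 ++ [it] else b.1),
     (if tm && sm then b.2.1 ++ [it] else b.2.1),
     (if tm then b.2.2.1 ++ [it] else b.2.2.1),
     (if sm then b.2.2.2.1 ++ [it] else b.2.2.2.1),
     (if v == "" && t == "" && s == "" then b.2.2.2.2 ++ [it] else b.2.2.2.2))

def get_most_relevant_ccn_py_alt (raw_part_name : String) (ccn_table : List (List (String × String))) (view_name : Option String) (source_table : Option String) (source_system : Option String) : List (List (String × String)) :=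
  let key := PySem.Str.lower raw_part_name
  let b := ccn_table.foldl (pvB_step view_name source_table source_system key) ([], [], [], [], [])
  pvOr b.1 (pvOr b.2.1 (pvOr b.2.2.1 (pvOr b.2.2.2.1 b.2.2.2.2)))

-- ===== PRECONDITION & SPEC =====
-- Pre_ excludes tables on which the Python dict lookups raise KeyError: a row without
-- "RAW_COLUMN_NAME", or a relevant row missing one of the three match keys; this slightly
-- over-excludes (A can return before touching a missing key of a relevant row — see cites).
def Pre_get_most_relevant_ccn_py (raw_part_name : String) (ccn_table : List (List (String × String))) (view_name : Option String) (source_table : Option String) (source_system : Option String) : Prop :=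
  ∀ it ∈ ccn_table, pvHasKey it "RAW_COLUMN_NAME" = true ∧
    (pvRel raw_part_name it = true →
      pvHasKey it "VIEW_NAME" = true ∧ pvHasKey it "RAW_TABLE_NAME" = true ∧ pvHasKey it "SOURCE_SYSTEM" = true)
instance (raw_part_name : String) (ccn_table : List (List (String × String))) (view_name : Option String) (source_table : Option String) (source_system : Option String) : Decidable (Pre_get_most_relevant_ccn_py raw_part_name ccn_table view_name source_table source_system) := by unfold Pre_get_most_relevant_ccn_py; infer_instance

def pvWitness_get_most_relevant_ccn_py : String × (List (List (String × String))) × Option String × Option String × Option String :=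
  ("c", [[("RAW_COLUMN_NAME", "C"), ("VIEW_NAME", "v"), ("RAW_TABLE_NAME", ""), ("SOURCE_SYSTEM", "")]], some "v", none, none)

def Spec_get_most_relevant_ccn_py (raw_part_name : String) (ccn_table : List (List (String × String))) (view_name : Option String) (source_table : Option String) (source_system : Option String) (out : List (List (String × String))) : Prop := out = get_most_relevant_ccn_py_alt raw_part_name ccn_table view_name source_table source_system
instance (raw_part_name : String) (ccn_table : List (List (String × String))) (view_name : Option String) (source_table : Option String) (source_system : Option String) (out : List (List (String × String))) : Decidable (Spec_get_most_relevant_ccn_py raw_part_name ccn_table view_name source_table source_system out) := by unfold Spec_get_most_relevant_ccn_py; infer_instance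

-- ===== CLAIM (what is proved, stated in full; the proofs are below) =====
def Claim_equal_get_most_relevant_ccn_py : Prop := ∀ (raw_part_name : String) (ccn_table : List (List (String × String))) (view_name : Option String) (source_table : Option String) (source_system : Option String), Dom_get_most_relevant_ccn_py raw_part_name ccn_table view_name source_table source_system → Pre_get_most_relevant_ccn_py raw_part_name ccn_table view_name source_table source_system → Spec_get_most_relevant_ccn_py raw_part_name ccn_table view_name source_table source_system (get_most_relevant_ccn_py raw_part_name ccn_table view_name source_table source_system)

-- ===== LEMMAS AND PROOFS =====

theorem pvApp_if (c : Bool) (x : List (List (String × String))) (a : List (String × String)) (f : List (List (String × String))) :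
    (if c then x ++ [a] else x) ++ f = x ++ (if c then a :: f else f) := by
  cases c <;> simp

theorem pvB_foldl_eq (vn st ss : Option String) (key : String) (l : List (List (String × String))) (b : pvB5) :
    l.foldl (pvB_step vn st ss key) b =
      (b.1 ++ (l.filter (fun it => (PySem.Str.lower (pvGet it "RAW_COLUMN_NAME") == key) && (match vn with | some x => pvGet it "VIEW_NAME" == x | none => false))),
       b.2.1 ++ (l.filter (fun it => (PySem.Str.lower (pvGet it "RAW_COLUMN_NAME") == key) && ((match st with | some x => pvGet it "RAW_TABLE_NAME" == x | none => false) && (match ss with | some x => pvGet it "SOURCE_SYSTEM" == x | none => false)))),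
       b.2.2.1 ++ (l.filter (fun it => (PySem.Str.lower (pvGet it "RAW_COLUMN_NAME") == key) && (match st with | some x => pvGet it "RAW_TABLE_NAME" == x | none => false))),
       b.2.2.2.1 ++ (l.filter (fun it => (PySem.Str.lower (pvGet it "RAW_COLUMN_NAME") == key) && (match ss with | some x => pvGet it "SOURCE_SYSTEM" == x | none => false))),
       b.2.2.2.2 ++ (l.filter (fun it => (PySem.Str.lower (pvGet it "RAW_COLUMN_NAME") == key) && (pvGet it "VIEW_NAME" == "" && pvGet it "RAW_TABLE_NAME" == "" && pvGet it "SOURCE_SYSTEM" == "")))) := by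
  induction l generalizing b with
  | nil => simp
  | cons it l ih =>
    simp only [List.foldl_cons, ih, List.filter_cons]
    by_cases hr : (PySem.Str.lower (pvGet it "RAW_COLUMN_NAME") == key) = true
    · simp only [pvB_step, bne, hr, Bool.not_true, Bool.false_eq_true, if_false, Bool.true_and,
        pvApp_if]
    · simp only [Bool.not_eq_true] at hr
      have hr' : PySem.Str.lower (pvGet it "RAW_COLUMN_NAME") ≠ key := by simpa using hr
      simp [pvB_step, hr, hr']

theorem pvOr_len (x R : List (List (String × String))) : (if x.length > 0 then x else R) = pvOr x R := by
  cases x <;> simp [pvOr]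

theorem pvOr_nil (y : List (List (String × String))) : pvOr [] y = y := by
  simp [pvOr]

theorem pvAfterTable_eq (rel : List (List (String × String))) (ss : Option String) :
    pvA_afterTable rel ss =
      pvOr (rel.filter (fun it => match ss with | some x => pvGet it "SOURCE_SYSTEM" == x | none => false))
        (rel.filter (fun it => pvGet it "VIEW_NAME" == "" && pvGet it "RAW_TABLE_NAME" == "" && pvGet it "SOURCE_SYSTEM" == "")) := by
  cases ss with
  | none => simp only [pvA_afterTable, List.filter_false, pvOr_nil]
  | some s => simp only [pvA_afterTable]; exact pvOr_len _ _

theorem pvAfterCombo_eq (rel : List (List (String × String))) (st ss : Option String) :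
    pvA_afterCombo rel st ss =
      pvOr (rel.filter (fun it => match st with | some x => pvGet it "RAW_TABLE_NAME" == x | none => false))
        (pvOr (rel.filter (fun it => match ss with | some x => pvGet it "SOURCE_SYSTEM" == x | none => false))
          (rel.filter (fun it => pvGet it "VIEW_NAME" == "" && pvGet it "RAW_TABLE_NAME" == "" && pvGet it "SOURCE_SYSTEM" == ""))) := by
  cases st with
  | none => simp only [pvA_afterCombo, pvAfterTable_eq, List.filter_false, pvOr_nil]
  | some t => simp only [pvA_afterCombo]; rw [pvAfterTable_eq]; exact pvOr_len _ _

theorem pvAfterView_eq (rel : List (List (String × String))) (st ss : Option String) :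
    pvA_afterView rel st ss =
      pvOr (rel.filter (fun it =>
          (match st with | some x => pvGet it "RAW_TABLE_NAME" == x | none => false) &&
          (match ss with | some x => pvGet it "SOURCE_SYSTEM" == x | none => false)))
        (pvOr (rel.filter (fun it => match st with | some x => pvGet it "RAW_TABLE_NAME" == x | none => false))
          (pvOr (rel.filter (fun it => match ss with | some x => pvGet it "SOURCE_SYSTEM" == x | none => false))
            (rel.filter (fun it => pvGet it "VIEW_NAME" == "" && pvGet it "RAW_TABLE_NAME" == "" && pvGet it "SOURCE_SYSTEM" == "")))) := by
  cases st with
  | none =>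
    cases ss with
    | none => simp only [pvA_afterView, pvAfterCombo_eq, Bool.false_and, List.filter_false, pvOr_nil]
    | some s => simp only [pvA_afterView, pvAfterCombo_eq, Bool.false_and, List.filter_false, pvOr_nil]
  | some t =>
    cases ss with
    | none => simp only [pvA_afterView, pvAfterCombo_eq, Bool.and_false, List.filter_false, pvOr_nil]
    | some s => simp only [pvA_afterView]; rw [pvAfterCombo_eq]; exact pvOr_len _ _

theorem pvFilter_and (l : List (List (String × String))) (p q : List (String × String) → Bool) :
    l.filter (fun it => p it && q it) = (l.filter p).filter q := by
  induction l with
  | nil => rfl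
  | cons a l ih =>
    by_cases hp : p a = true <;> by_cases hq : q a = true <;>
      simp [hp, hq, ih]

theorem get_most_relevant_ccn_py_spec : Claim_equal_get_most_relevant_ccn_py := by
  intro raw ccn vn st ss _hdom _hpre
  unfold Spec_get_most_relevant_ccn_py
  simp only [get_most_relevant_ccn_py, get_most_relevant_ccn_py_alt]
  rw [pvB_foldl_eq]
  simp only [List.nil_append]
  have hf : ∀ (q : List (String × String) → Bool),
      ccn.filter (fun it => (PySem.Str.lower (pvGet it "RAW_COLUMN_NAME") == PySem.Str.lower raw) && q it)
        = (ccn.filter (pvRel raw)).filter q := by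
    intro q
    rw [pvFilter_and]
    rfl
  rw [hf, hf, hf, hf, hf]
  by_cases h0 : (ccn.filter (pvRel raw)) = []
  · simp [h0, pvOr]
  · rw [if_neg (by simpa [List.length_eq_zero_iff] using h0)]
    cases vn with
    | none =>
      dsimp only
      simp only [List.filter_false, pvOr_nil]
      exact pvAfterView_eq _ _ _
    | some v =>
      dsimp only
      rw [pvOr_len, pvAfterView_eq]
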